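-- pv_equiv track=rewrite | github.com/park-geun-hyeong/Algorithm | Queue_Stack/queue_2164.py | solution
-- ===== SOURCE A (Python) =====
-- from collections import deque
--
-- def solution(n):
--     q = deque()
--     for i in range(1, n + 1):
--         q.append(i)
--
--     while (len(q) > 1):
--         q.popleft()
--         q.append(q.popleft())
--
--     return q[0]
-- ===== SOURCE B (Python) =====
-- def solution(n):
--     # closed form: answer is n if n is a power of two, else 2*(n - p)
--     # where p is the largest power of two <= n
--     m, p = n, 1
--     while m > 1:
--         m //= 2
--         p *= 2
--     return n if p == n else 2 * (n - p)
-- ===== Notes on version B (the rewrite author's own statement) =====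
-- stated objective: faster
-- what changed: Replaces the O(n) queue simulation with the closed form: repeatedly halve n to find the largest power of two p <= n, then answer n if p == n else 2*(n - p).
import Mathlib
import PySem

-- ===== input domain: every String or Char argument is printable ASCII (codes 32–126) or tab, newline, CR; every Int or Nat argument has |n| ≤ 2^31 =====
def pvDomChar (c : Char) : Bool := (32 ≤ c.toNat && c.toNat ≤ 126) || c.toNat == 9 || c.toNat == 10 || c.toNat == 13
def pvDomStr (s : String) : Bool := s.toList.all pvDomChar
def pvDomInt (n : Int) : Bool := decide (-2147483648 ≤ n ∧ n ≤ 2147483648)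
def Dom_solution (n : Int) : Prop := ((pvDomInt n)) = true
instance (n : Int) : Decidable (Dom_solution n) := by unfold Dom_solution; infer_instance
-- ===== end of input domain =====

-- B replaces A's O(n) queue simulation by the O(log n) closed form
-- (n if n is a power of two, else 2*(n - largest power of two ≤ n)).

-- ===== PORT A =====
-- collections.deque modelled as a (front, back) pair of lists: append pushes onto
-- back, popleft takes from front, refilling it from the reversed back when empty
-- (exact deque behaviour; O(1) amortized like Python's deque).
def dqLen (q : List Int × List Int) : Nat := q.1.length + q.2.length

def dqAppend (q : List Int × List Int) (x : Int) : List Int × List Int := (q.1, x :: q.2)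

def dqPop? (q : List Int × List Int) : Option (Int × (List Int × List Int)) :=
  match q with
  | (x :: f, b) => some (x, (f, b))
  | ([], b) =>
    match b.reverse with
    | x :: f => some (x, (f, []))
    | [] => none

-- termination helper for the while loop (cited by decreasing_by)
lemma dqPop?_len {q : List Int × List Int} {a : Int} {q' : List Int × List Int}
    (h : dqPop? q = some (a, q')) : dqLen q' + 1 = dqLen q := by
  match q with
  | (x :: f, b) =>
    simp only [dqPop?] at h
    cases h
    simp [dqLen]
    omega
  | ([], b) =>
    simp only [dqPop?] at h
    cases hb : b.reverse with
    | nil => rw [hb] at h; cases h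
    | cons x f =>
      rw [hb] at h
      cases h
      have : b.length = (b.reverse).length := by simp
      rw [hb] at this
      simp [dqLen]
      simp at this
      omega

-- while len(q) > 1: q.popleft(); q.append(q.popleft())
def loopA (q : List Int × List Int) : List Int × List Int :=
  if 1 < dqLen q then
    match hp : dqPop? q with
    | some (_, q1) =>
      match hp2 : dqPop? q1 with
      | some (b, q2) => loopA (dqAppend q2 b)
      | none => q1
    | none => q
  else q
termination_by dqLen q
decreasing_by
  have h1 := dqPop?_len hp
  have h2 := dqPop?_len hp2
  simp only [dqAppend, dqLen, List.length_cons] at *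
  omega

def dqToList (q : List Int × List Int) : List Int := q.1 ++ q.2.reverse

def solution (n : Int) : Int :=
  -- q = deque(); for i in range(1, n+1): q.append(i)
  let q := (PySem.List.pyRange 1 (n+1) 1).foldl dqAppend ([], [])
  -- return q[0]  (raises IndexError when q is empty — excluded by Pre_solution)
  (PySem.List.pyGet? (dqToList (loopA q)) 0).getD 0

-- ===== PORT B =====
-- m, p = n, 1; while m > 1: m //= 2; p *= 2
def halveB (m p : Int) : Int :=
  if 1 < m then halveB (PySem.Int.floordiv m 2) (p * 2) else p
termination_by m.toNat
decreasing_by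
  rename_i h
  rw [PySem.Int.floordiv_eq_ediv_of_pos (by omega)]
  omega

def solution_alt (n : Int) : Int :=
  let p := halveB n 1
  if p = n then n else 2 * (n - p)

-- ===== PRECONDITION & SPEC =====
-- Pre_ excludes n ≤ 0, on which A's queue is empty and q[0] raises IndexError.
def Pre_solution (n : Int) : Prop := 1 ≤ n
instance (n : Int) : Decidable (Pre_solution n) := by unfold Pre_solution; infer_instance
def pvWitness_solution : Int := 5


def Spec_solution (n : Int) (out : Int) : Prop := out = solution_alt n
instance (n : Int) (out : Int) : Decidable (Spec_solution n out) := by unfold Spec_solution; infer_instance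

-- ===== CLAIM (what is proved, stated in full; the proofs are below) =====
def Claim_equal_solution : Prop := ∀ (n : Int), Dom_solution n → Pre_solution n → Spec_solution n (solution n)

-- ===== LEMMAS AND PROOFS =====

-- specification view of A's while loop on the deque's element list
def stepSpec : List Int → List Int
  | _ :: b :: rest => stepSpec (rest ++ [b])
  | q => q
termination_by q => q.length
decreasing_by simp

lemma dqToList_append (q : List Int × List Int) (x : Int) :
    dqToList (dqAppend q x) = dqToList q ++ [x] := by
  simp [dqToList, dqAppend]

lemma dqLen_toList (q : List Int × List Int) : (dqToList q).length = dqLen q := by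
  simp [dqToList, dqLen]

lemma foldl_dqAppend (xs : List Int) : ∀ q : List Int × List Int,
    dqToList (xs.foldl dqAppend q) = xs.foldl (fun acc x => acc ++ [x]) (dqToList q) := by
  induction xs with
  | nil => intro q; simp
  | cons x xs ih =>
    intro q
    simp only [List.foldl_cons, ih, dqToList_append]

lemma dqPop?_toList {q : List Int × List Int} {a : Int} {q' : List Int × List Int}
    (h : dqPop? q = some (a, q')) : dqToList q = a :: dqToList q' := by
  match q with
  | (x :: f, b) =>
    simp only [dqPop?] at h
    cases h
    simp [dqToList]
  | ([], b) =>
    simp only [dqPop?] at h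
    cases hb : b.reverse with
    | nil => rw [hb] at h; cases h
    | cons x f =>
      rw [hb] at h
      cases h
      simp [dqToList, hb]

lemma dqPop?_none {q : List Int × List Int} (h : dqPop? q = none) : dqLen q = 0 := by
  match q with
  | (x :: f, b) => simp [dqPop?] at h
  | ([], b) =>
    simp only [dqPop?] at h
    cases hb : b.reverse with
    | nil =>
      have : b.length = (b.reverse).length := by simp
      rw [hb] at this
      simp at this
      simp [dqLen, this]
    | cons x f => rw [hb] at h; cases h

lemma stepSpec_small {l : List Int} (h : l.length ≤ 1) : stepSpec l = l := by
  match l with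
  | [] => simp [stepSpec]
  | [a] => simp [stepSpec]
  | a :: b :: rest => simp at h

lemma loopA_toList (k : Nat) : ∀ q : List Int × List Int, dqLen q ≤ k →
    dqToList (loopA q) = stepSpec (dqToList q) := by
  induction k with
  | zero =>
    intro q hq
    rw [loopA.eq_def, if_neg (by omega)]
    rw [stepSpec_small (by rw [dqLen_toList]; omega)]
  | succ k ih =>
    intro q hq
    rw [loopA.eq_def]
    by_cases h : 1 < dqLen q
    case neg =>
      rw [if_neg h, stepSpec_small (by rw [dqLen_toList]; omega)]
    case pos =>
      rw [if_pos h]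
      split
      case _ a q1 hp =>
        have hl1 := dqPop?_len hp
        have ht1 := dqPop?_toList hp
        split
        case _ b q2 hp2 =>
          have hl2 := dqPop?_len hp2
          have ht2 := dqPop?_toList hp2
          rw [ht1, ht2]
          have hrec : stepSpec (a :: b :: dqToList q2) = stepSpec (dqToList q2 ++ [b]) := by
            rw [stepSpec]
          rw [hrec, ← dqToList_append q2 b]
          exact ih (dqAppend q2 b) (by simp only [dqAppend, dqLen, List.length_cons] at *; omega)
        case _ hp2 =>
          exact absurd (dqPop?_none hp2) (by omega)
      case _ hp =>
        exact absurd (dqPop?_none hp) (by omega)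

-- largest power of two ≤ m (for m ≥ 1)
def pwN (m : Nat) : Nat := 2 ^ Nat.log 2 m

lemma pwN_le {m : Nat} (h : 1 ≤ m) : pwN m ≤ m :=
  Nat.pow_log_le_self 2 (by omega)

lemma lt_two_pwN (m : Nat) : m < 2 * pwN m := by
  have := Nat.lt_pow_succ_log_self (b := 2) (by norm_num) m
  simpa [pwN, pow_succ, Nat.mul_comm] using this

lemma pwN_unique {m k : Nat} (h1 : 2 ^ k ≤ m) (h2 : m < 2 ^ (k + 1)) : pwN m = 2 ^ k := by
  rw [pwN, Nat.log_eq_of_pow_le_of_lt_pow h1 h2]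

lemma pwN_double {m : Nat} (h : 2 ≤ m) : pwN m = 2 * pwN (m / 2) := by
  have h1 : pwN (m / 2) ≤ m / 2 := pwN_le (by omega)
  have h2 : m / 2 < 2 * pwN (m / 2) := lt_two_pwN (m / 2)
  have : pwN m = 2 ^ (Nat.log 2 (m / 2) + 1) := by
    apply pwN_unique
    · rw [pow_succ]
      calc 2 ^ Nat.log 2 (m / 2) * 2 = 2 * pwN (m / 2) := by rw [pwN]; ring
        _ ≤ 2 * (m / 2) := by omega
        _ ≤ m := by omega
    · rw [pow_succ, pow_succ]
      have : 2 ^ Nat.log 2 (m / 2) = pwN (m / 2) := rfl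
      omega
  rw [this, pow_succ, pwN]; ring

lemma halveB_base {m : Int} (h : ¬ 1 < m) (p : Int) : halveB m p = p := by
  rw [halveB, if_neg h]

lemma halveB_step {m : Int} (h : 1 < m) (p : Int) :
    halveB m p = halveB (PySem.Int.floordiv m 2) (p * 2) := by
  rw [halveB, if_pos h]

lemma halveB_mul (k : Nat) : ∀ (m : Int), m.toNat ≤ k → ∀ p, halveB m p = p * halveB m 1 := by
  induction k with
  | zero =>
    intro m hm p
    have h : ¬ 1 < m := by omega
    rw [halveB_base h p, halveB_base h 1]
    ring
  | succ k ih =>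
    intro m hm p
    by_cases h : 1 < m
    · have hfd : PySem.Int.floordiv m 2 = m / 2 := PySem.Int.floordiv_eq_ediv_of_pos (by omega)
      have hle : (PySem.Int.floordiv m 2).toNat ≤ k := by rw [hfd]; omega
      rw [halveB_step h p, halveB_step h 1, ih _ hle (p * 2), ih _ hle (1 * 2)]
      ring
    · rw [halveB_base h p, halveB_base h 1]
      ring

lemma halveB_eq_pwN (k : Nat) : ∀ (m : Int), 1 ≤ m → m.toNat ≤ k → halveB m 1 = (pwN m.toNat : Int) := by
  induction k with
  | zero => intro m h1 hm; omega
  | succ k ih =>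
    intro m h1 hm
    by_cases h : 1 < m
    · rw [halveB_step h 1]
      have hfd : PySem.Int.floordiv m 2 = m / 2 := PySem.Int.floordiv_eq_ediv_of_pos (by omega)
      have hle : (PySem.Int.floordiv m 2).toNat ≤ k := by rw [hfd]; omega
      have h1' : 1 ≤ PySem.Int.floordiv m 2 := by rw [hfd]; omega
      rw [halveB_mul k _ hle, ih _ h1' hle]
      have htn : (PySem.Int.floordiv m 2).toNat = m.toNat / 2 := by rw [hfd]; omega
      rw [htn, pwN_double (m := m.toNat) (by omega)]
      push_cast; ring
    · have hm1 : m = 1 := by omega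
      rw [halveB_base h 1, hm1]
      simp [pwN]

-- 0-based survivor index of A's loop on a queue of length n
def sN : Nat → Nat
  | 0 => 0
  | 1 => 0
  | (n+2) => if sN (n+1) < n then sN (n+1) + 2 else 1

lemma sN_lt : ∀ n, 1 ≤ n → sN n < n := by
  intro n h
  match n with
  | 1 => simp [sN]
  | (n+2) =>
    rw [sN]
    split
    · omega
    · omega

lemma stepSpec_eq (k : Nat) : ∀ q : List Int, q.length ≤ k → q ≠ [] →
    stepSpec q = [q.getD (sN q.length) 0] := by
  induction k with
  | zero => intro q hq hne; cases q <;> simp_all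
  | succ k ih =>
    intro q hq hne
    match q with
    | [a] => simp [stepSpec, sN]
    | a :: b :: rest =>
      rw [stepSpec]
      have hlen : (rest ++ [b]).length = rest.length + 1 := by simp
      have hih := ih (rest ++ [b]) (by simp at hq ⊢; omega) (by simp)
      rw [hih, hlen]
      have hslt : sN (rest.length + 1) < rest.length + 1 := sN_lt _ (by omega)
      by_cases hc : sN (rest.length + 1) < rest.length
      · have hs : sN (rest.length + 2) = sN (rest.length + 1) + 2 := by
          rw [sN]; simp [hc]
        simp only [List.length_cons, hs]
        rw [List.getD_eq_getElem _ _ (by simp; omega),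
            List.getD_eq_getElem _ _ (by simp; omega)]
        congr 1
        rw [List.getElem_append_left (by omega)]
        simp
      · have hj : sN (rest.length + 1) = rest.length := by omega
        have hs : sN (rest.length + 2) = 1 := by rw [sN]; simp [hc]
        simp only [List.length_cons, hs, hj]
        rw [List.getD_eq_getElem _ _ (by simp)]
        simp

lemma sN_closed : ∀ n : Nat, 1 ≤ n →
    sN n = if n = pwN n then n - 1 else 2 * (n - pwN n) - 1 := by
  intro n
  induction n with
  | zero => omega
  | succ m ih =>
    intro _
    by_cases hm : 1 ≤ m
    case neg =>
      have : m = 0 := by omega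
      subst this
      simp [sN, pwN]
    case pos =>
      have hrec : sN (m + 1) = if sN m < m - 1 then sN m + 2 else 1 := by
        match m, hm with
        | (j+1), _ =>
          rw [sN]
          simp
      have hple := pwN_le hm
      have hplt := lt_two_pwN m
      have hppow : pwN m = 2 ^ Nat.log 2 m := rfl
      have hppos : 1 ≤ pwN m := by
        rw [hppow]; exact Nat.one_le_two_pow
      rw [hrec, ih hm]
      by_cases hpow : m = pwN m
      · -- m is a power of two: survivor of m was last; next pw
        have hcond : ¬ (m - 1 < m - 1) := by omega
        rw [if_neg (by rw [if_pos hpow]; omega)]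
        by_cases hm1 : m = 1
        · subst hm1
          have : pwN 2 = 2 := pwN_unique (k := 1) (by norm_num) (by norm_num)
          simp [this]
        · -- m ≥ 2 and m = 2^k: pwN (m+1) = m
          have hpw1 : pwN (m + 1) = 2 ^ Nat.log 2 m := by
            apply pwN_unique
            · rw [← hppow]; omega
            · rw [pow_succ, ← hppow]; omega
          rw [hpw1, ← hppow, ← hpow]
          rw [if_neg (by omega)]
          omega
      · -- m not a power of two
        have hlt : pwN m < m := by omega
        have hcond : 2 * (m - pwN m) - 1 < m - 1 := by omega
        rw [if_pos (by rw [if_neg hpow]; exact hcond)]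
        rw [if_neg hpow]
        by_cases h2p : m + 1 = 2 * pwN m
        · have hpw1 : pwN (m + 1) = 2 ^ (Nat.log 2 m + 1) := by
            apply pwN_unique
            · rw [pow_succ, ← hppow]; omega
            · rw [pow_succ, pow_succ, ← hppow]; omega
          have : pwN (m + 1) = 2 * pwN m := by
            rw [hpw1, pow_succ, ← hppow]; ring
          rw [this, if_pos (by omega)]
          omega
        · have hpw1 : pwN (m + 1) = 2 ^ Nat.log 2 m := by
            apply pwN_unique
            · rw [← hppow]; omega
            · rw [pow_succ, ← hppow]; omega
          rw [hpw1, ← hppow, if_neg (by omega)]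
          omega

-- the built queue is just range(1, n+1)
lemma queue_eq (n : Int) :
    (PySem.List.pyRange 1 (n+1) 1).foldl (fun acc i => acc ++ [i]) [] =
      PySem.List.pyRange 1 (n+1) 1 := by
  simpa using PySem.List.foldl_append_singleton (l := PySem.List.pyRange 1 (n+1) 1) (acc := ([] : List Int))

-- ===== VERDICT (by name: the statement is the Claim_ definition above) =====
theorem solution_spec : Claim_equal_solution := by
  intro n _ hpre
  unfold Spec_solution solution solution_alt
  have h1 : (1:Int) ≤ n := hpre
  have hlen : (PySem.List.pyRange 1 (n+1) 1).length = n.toNat := by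
    rw [PySem.List.length_pyRange_one]; omega
  have hne : PySem.List.pyRange 1 (n+1) 1 ≠ [] := by
    intro h
    rw [h] at hlen
    simp at hlen
    omega
  show (PySem.List.pyGet? (dqToList (loopA
        ((PySem.List.pyRange 1 (n+1) 1).foldl dqAppend ([], [])))) 0).getD 0 =
      if halveB n 1 = n then n else 2 * (n - halveB n 1)
  have hq : dqToList ((PySem.List.pyRange 1 (n+1) 1).foldl dqAppend ([], [])) =
      PySem.List.pyRange 1 (n+1) 1 := by
    rw [foldl_dqAppend]
    simpa [dqToList] using queue_eq n
  rw [loopA_toList (dqLen ((PySem.List.pyRange 1 (n+1) 1).foldl dqAppend ([], []))) _ le_rfl, hq]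
  rw [stepSpec_eq (PySem.List.pyRange 1 (n+1) 1).length _ le_rfl hne, hlen]
  have hjlt : sN n.toNat < n.toNat := sN_lt _ (by omega)
  have hget : (PySem.List.pyRange 1 (n+1) 1).getD (sN n.toNat) 0 = 1 + (sN n.toNat : Int) := by
    rw [List.getD_eq_getElem _ _ (by omega)]
    rw [PySem.List.getElem_pyRange_one]
  rw [hget]
  simp only [PySem.List.pyGet?, PySem.List.pyIdx?]
  norm_num
  rw [halveB_eq_pwN n.toNat n (by omega) le_rfl]
  have hclosed := sN_closed n.toNat (by omega)
  have hple := pwN_le (m := n.toNat) (by omega)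
  by_cases hp : ((pwN n.toNat : Int)) = n
  · rw [if_pos hp]
    have : n.toNat = pwN n.toNat := by omega
    rw [hclosed, if_pos this]
    omega
  · rw [if_neg hp]
    have : ¬ (n.toNat = pwN n.toNat) := by omega
    rw [hclosed, if_neg this]
    have : pwN n.toNat < n.toNat := by omega
    omega
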